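-- pv_equiv track=rewrite | github.com/mattpaletta/consensus-examples | vector_clocks.py | _merge_vectors
-- ===== SOURCE A (Python) =====
-- from typing import Dict, List, NamedTuple
--
-- def _merge_vectors(v1: Dict[str, int], v2: Dict[str, int]):
--     new_vector = {}
--     for key in v1.keys():
--         v1_val = v1.get(key)
--         if key in v2.keys():
--             v2_val = v2.get(key)
--         else:
--            v2_val = -v1_val
--
--         new_vector.update({key: max(v1_val, v2_val)})
--
--     for key in v2.keys():
--         v2_val = v2.get(key)
--         if key in v1.keys():
--             v1_val = v1.get(key)
--         else:
--             v1_val = -v2_val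
--         new_vector.update({key: max(v1_val, v2_val)})
--     return new_vector
-- ===== SOURCE B (Python) =====
-- def _merge_vectors(v1, v2):
--     # Single fold over the concatenated item streams, tagging each key with
--     # whether it was seen in both inputs; a finalize pass takes abs of
--     # once-seen values (max(v, -v) == abs(v)), max for twice-seen ones.
--     acc = {}
--     for k, x in list(v1.items()) + list(v2.items()):
--         if k in acc:
--             acc[k] = (max(acc[k][0], x), True)
--         else:
--             acc[k] = (x, False)
--     return {k: (v if shared else abs(v)) for k, (v, shared) in acc.items()}
-- ===== Notes on version B (the rewrite author's own statement) =====
-- stated objective: alternative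
-- what changed: Instead of A's two per-side loops with membership tests and negation defaults, B does one fold over the concatenated item streams that tags each key with a seen-in-both flag (overwriting with max on the second sighting), then a finalize pass turns once-seen values into their absolute value (max(v,-v)=abs(v)) and keeps twice-seen maxima.
import Mathlib
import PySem

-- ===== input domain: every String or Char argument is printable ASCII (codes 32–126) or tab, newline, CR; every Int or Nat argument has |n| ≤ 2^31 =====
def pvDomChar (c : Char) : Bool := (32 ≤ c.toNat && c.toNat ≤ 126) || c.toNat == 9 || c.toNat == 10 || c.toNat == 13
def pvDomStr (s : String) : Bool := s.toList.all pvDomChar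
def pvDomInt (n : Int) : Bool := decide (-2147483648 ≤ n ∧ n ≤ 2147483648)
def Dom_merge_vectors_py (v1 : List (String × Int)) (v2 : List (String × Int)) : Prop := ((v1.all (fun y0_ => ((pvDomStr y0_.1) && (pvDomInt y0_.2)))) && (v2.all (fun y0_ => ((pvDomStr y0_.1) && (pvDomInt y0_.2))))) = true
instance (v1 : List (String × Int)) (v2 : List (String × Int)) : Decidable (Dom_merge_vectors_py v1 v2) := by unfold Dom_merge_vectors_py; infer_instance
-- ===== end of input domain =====

-- B replaces A's two per-side loops (membership tests + negation defaults) by one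
-- fold over the concatenated item streams tagging each key with a seen-in-both
-- flag, then a finalize pass (abs for once-seen, max for twice-seen) (objective: alternative).

-- ===== PORT A =====
-- Literal transliteration of A: two loops over v1.keys() and v2.keys(), each
-- picking the missing side's value as the negation of the present one, and
-- updating new_vector with the max.  v1.get(key) is known present (key comes
-- from keys()), so the Option is read with a 0 default that is never used.
def merge_vectors_py (v1 : List (String × Int)) (v2 : List (String × Int)) : List (String × Int) :=
  let d1 : PySem.Dict String Int := PySem.Dict.mk v1
  let d2 : PySem.Dict String Int := PySem.Dict.mk v2
  let nv : PySem.Dict String Int :=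
    d1.keys.foldl (fun nv key =>
      let v1_val := d1.getD key 0
      let v2_val := if d2.contains key then d2.getD key 0 else -v1_val
      nv.insert key (max v1_val v2_val)) PySem.Dict.empty
  let nv :=
    d2.keys.foldl (fun nv key =>
      let v2_val := d2.getD key 0
      let v1_val := if d1.contains key then d1.getD key 0 else -v2_val
      nv.insert key (max v1_val v2_val)) nv
  nv.items

-- ===== PORT B =====
-- Literal transliteration of B: one fold over v1.items() + v2.items() into an
-- accumulator dict key ↦ (value, seen-in-both flag) — a second sighting stores
-- (max(previous, x), True), a first sighting (x, False) — then a dict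
-- comprehension keeps twice-seen maxima and takes abs of once-seen values.
def merge_vectors_py_alt (v1 : List (String × Int)) (v2 : List (String × Int)) : List (String × Int) :=
  let d1 : PySem.Dict String Int := PySem.Dict.mk v1
  let d2 : PySem.Dict String Int := PySem.Dict.mk v2
  let acc : PySem.Dict String (Int × Bool) :=
    (d1.items ++ d2.items).foldl (fun acc p =>
      acc.insert p.1
        (if acc.contains p.1 then (max (acc.getD p.1 (0, false)).1 p.2, true)
         else (p.2, false))) PySem.Dict.empty
  (acc.items.foldl (fun d p =>
      d.insert p.1 (if p.2.2 then p.2.1 else |p.2.1|)) PySem.Dict.empty).items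

-- ===== PRECONDITION & SPEC =====
-- Pre_ restricts to association lists with pairwise-distinct keys: these are
-- exactly the lists that represent a Python dict (A's parameters are dicts,
-- which cannot carry duplicate keys), so no input reachable from Python is excluded.
def Pre_merge_vectors_py (v1 : List (String × Int)) (v2 : List (String × Int)) : Prop :=
  (v1.map Prod.fst).Nodup ∧ (v2.map Prod.fst).Nodup
instance (v1 : List (String × Int)) (v2 : List (String × Int)) : Decidable (Pre_merge_vectors_py v1 v2) := by unfold Pre_merge_vectors_py; infer_instance

def pvWitness_merge_vectors_py : (List (String × Int)) × (List (String × Int)) :=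
  ([("a", 3), ("b", -2)], [("b", 5), ("c", -4)])

def Spec_merge_vectors_py (v1 : List (String × Int)) (v2 : List (String × Int)) (out : List (String × Int)) : Prop := out = merge_vectors_py_alt v1 v2
instance (v1 : List (String × Int)) (v2 : List (String × Int)) (out : List (String × Int)) : Decidable (Spec_merge_vectors_py v1 v2 out) := by unfold Spec_merge_vectors_py; infer_instance

-- ===== CLAIM (what is proved, stated in full; the proofs are below) =====
def Claim_equal_merge_vectors_py : Prop := ∀ (v1 : List (String × Int)) (v2 : List (String × Int)), Dom_merge_vectors_py v1 v2 → Pre_merge_vectors_py v1 v2 → Spec_merge_vectors_py v1 v2 (merge_vectors_py v1 v2)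

-- ===== LEMMAS AND PROOFS =====

-- A fold of inserts whose values depend only on the key: existing keys are
-- overwritten in place, fresh keys are appended in traversal order.
theorem pv_foldl_insert_items {κ ν : Type} [BEq κ] [LawfulBEq κ] [DecidableEq κ]
    (g : κ → ν) (l : List κ) (d : PySem.Dict κ ν) (hl : l.Nodup) :
    (l.foldl (fun d k => d.insert k (g k)) d).items
      = d.items.map (fun p => if p.1 ∈ l then (p.1, g p.1) else p)
        ++ (l.filter (fun k => !d.contains k)).map (fun k => (k, g k)) := by
  induction l generalizing d with
  | nil => simp
  | cons k t ih =>
    obtain ⟨hkt, htnd⟩ := List.nodup_cons.mp hl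
    have hrec := ih (d.insert k (g k)) htnd
    simp only [List.foldl_cons]
    rw [hrec]
    have hfilter : (t.filter (fun j => !(d.insert k (g k)).contains j))
        = t.filter (fun j => !d.contains j) := by
      apply List.filter_congr
      intro j hj
      have hjk : j ≠ k := fun h => hkt (h ▸ hj)
      simp [PySem.Dict.contains_insert, hjk]
    rw [hfilter]
    by_cases hc : d.contains k = true
    · rw [PySem.Dict.items_insert_of_contains _ _ hc]
      rw [List.map_map]
      have hmap : ∀ p : κ × ν,
          ((fun p => if p.1 ∈ t then (p.1, g p.1) else p) ∘
           (fun p => if p.1 == k then (k, g k) else p)) p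
          = (if p.1 ∈ k :: t then (p.1, g p.1) else p) := by
        intro p
        by_cases hpk : p.1 = k
        · simp [Function.comp, hpk, hkt]
        · have : (p.1 == k) = false := by simp [hpk]
          simp [Function.comp, this, hpk, List.mem_cons]
      rw [List.map_congr_left (fun p _ => hmap p)]
      have : (k :: t).filter (fun j => !d.contains j) = t.filter (fun j => !d.contains j) := by
        simp [hc]
      rw [this]
    · rw [PySem.Dict.items_insert_of_not_contains _ _ (by simpa using hc)]
      rw [List.map_append]
      have h1 : [(k, g k)].map (fun p => if p.1 ∈ t then (p.1, g p.1) else p) = [(k, g k)] := by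
        simp [hkt]
      rw [h1]
      have h2 : d.items.map (fun p => if p.1 ∈ t then (p.1, g p.1) else p)
          = d.items.map (fun p => if p.1 ∈ k :: t then (p.1, g p.1) else p) := by
        apply List.map_congr_left
        intro p hp
        have hpk : p.1 ≠ k := by
          intro h
          have : d.contains p.1 = true :=
            (PySem.Dict.contains_iff_mem_keys _ _).mpr (PySem.Dict.mem_keys_of_mem_items _ hp)
          rw [h] at this
          exact absurd this (by simpa using hc)
        simp [List.mem_cons, hpk]
      rw [h2]
      have h3 : (k :: t).filter (fun j => !d.contains j)
          = k :: t.filter (fun j => !d.contains j) := by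
        simp [hc]
      rw [h3]
      simp

-- B's accumulation step, named for the lemmas below.
def pvStep (acc : PySem.Dict String (Int × Bool)) (p : String × Int) :
    PySem.Dict String (Int × Bool) :=
  acc.insert p.1
    (if acc.contains p.1 then (max (acc.getD p.1 (0, false)).1 p.2, true)
     else (p.2, false))

-- First phase of B's fold: over items all of whose keys are fresh, the step
-- just appends (value, false) pairs in order.
theorem pv_fold_fresh (l : List (String × Int)) (acc : PySem.Dict String (Int × Bool))
    (hnd : (l.map Prod.fst).Nodup) (hfresh : ∀ p ∈ l, acc.contains p.1 = false) :
    (l.foldl pvStep acc).items = acc.items ++ l.map (fun p => (p.1, (p.2, false))) := by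
  induction l generalizing acc with
  | nil => simp
  | cons p t ih =>
    rw [List.map_cons] at hnd
    obtain ⟨hpt, htnd⟩ := List.nodup_cons.mp hnd
    have hc : acc.contains p.1 = false := hfresh p (by simp)
    have hstep : pvStep acc p = acc.insert p.1 (p.2, false) := by
      simp [pvStep, hc]
    simp only [List.foldl_cons, hstep]
    rw [ih _ htnd]
    · rw [PySem.Dict.items_insert_of_not_contains _ _ hc]
      simp
    · intro q hq
      have hqp : q.1 ≠ p.1 := by
        intro h
        exact hpt (h ▸ List.mem_map_of_mem hq)
      simp [PySem.Dict.contains_insert, hqp, hfresh q (List.mem_cons_of_mem _ hq)]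

-- Second phase: over a nodup-keyed item list, a key already in the accumulator
-- is overwritten in place with (max stored x, true); a fresh key appends (x, false).
theorem pv_fold_update (l : List (String × Int)) (acc : PySem.Dict String (Int × Bool))
    (hnd : (l.map Prod.fst).Nodup) (hacc : acc.keys.Nodup)
    (f : String → Int) (hf : ∀ p ∈ l, f p.1 = p.2) :
    (l.foldl pvStep acc).items
      = acc.items.map (fun q => if q.1 ∈ l.map Prod.fst then (q.1, (max q.2.1 (f q.1), true)) else q)
        ++ (l.filter (fun p => !acc.contains p.1)).map (fun p => (p.1, (p.2, false))) := by
  induction l generalizing acc with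
  | nil => simp
  | cons p t ih =>
    rw [List.map_cons] at hnd
    obtain ⟨hpt, htnd⟩ := List.nodup_cons.mp hnd
    have hft : ∀ q ∈ t, f q.1 = q.2 := fun q hq => hf q (List.mem_cons_of_mem _ hq)
    have hfp : f p.1 = p.2 := hf p (by simp)
    simp only [List.foldl_cons]
    by_cases hc : acc.contains p.1 = true
    · -- overwrite in place
      have hstep : pvStep acc p
          = acc.insert p.1 (max (acc.getD p.1 (0, false)).1 p.2, true) := by
        simp [pvStep, hc]
      rw [hstep]
      set w := (acc.getD p.1 (0, false)).1 with hw
      have hkeys : (acc.insert p.1 (max w p.2, true)).keys = acc.keys :=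
        PySem.Dict.keys_insert_of_contains _ _ hc
      rw [ih _ htnd (hkeys ▸ hacc) hft]
      rw [PySem.Dict.items_insert_of_contains _ _ hc, List.map_map]
      have hfilter : t.filter (fun q => !(acc.insert p.1 (max w p.2, true)).contains q.1)
          = t.filter (fun q => !acc.contains q.1) := by
        apply List.filter_congr
        intro q hq
        have hqp : q.1 ≠ p.1 := fun h => hpt (h ▸ List.mem_map_of_mem hq)
        simp [PySem.Dict.contains_insert, hqp]
      rw [hfilter]
      have hfilter2 : (p :: t).filter (fun q => !acc.contains q.1)
          = t.filter (fun q => !acc.contains q.1) := by simp [hc]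
      rw [hfilter2]
      congr 1
      apply List.map_congr_left
      intro q hq
      by_cases hqp : q.1 = p.1
      · have hgd : acc.getD q.1 (0, false) = q.2 :=
          PySem.Dict.getD_of_mem_items _ (by simpa using hq) hacc _
        have hbeq : (q.1 == p.1) = true := by simp [hqp]
        have htup : ((p.1, (max w p.2, true)) : String × Int × Bool)
            = (q.1, (max q.2.1 (f q.1), true)) := by
          have hww : w = q.2.1 := by rw [hw, ← hqp, hgd]
          have hfq : f q.1 = p.2 := by rw [hqp, hfp]
          rw [hww, hfq, hqp]
        simp only [Function.comp_apply, List.map_cons]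
        rw [if_pos hbeq, if_neg (by simpa using hpt),
          if_pos (by simp [hqp]), htup]
      · have hbeq : (q.1 == p.1) = false := by simp [hqp]
        simp only [Function.comp_apply, List.map_cons]
        rw [if_neg (show ¬((q.1 == p.1) = true) by simp [hqp])]
        by_cases hm : q.1 ∈ List.map Prod.fst t
        · simp [hm, List.mem_cons]
        · simp [hm, List.mem_cons, hqp]
    · -- fresh key: append
      have hcf : acc.contains p.1 = false := by simpa using hc
      have hstep : pvStep acc p = acc.insert p.1 (p.2, false) := by
        simp [pvStep, hcf]
      rw [hstep]
      have hkeys : (acc.insert p.1 (p.2, false)).keys = acc.keys ++ [p.1] :=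
        PySem.Dict.keys_insert_of_not_contains _ _ hcf
      have hknd : (acc.insert p.1 (p.2, false)).keys.Nodup := by
        rw [hkeys]
        refine List.Nodup.append hacc (List.nodup_singleton _) ?_
        intro a ha hb
        have : a = p.1 := by simpa using hb
        subst this
        exact absurd ((PySem.Dict.contains_iff_mem_keys _ _).mpr ha) (by simp [hcf])
      rw [ih _ htnd hknd hft]
      rw [PySem.Dict.items_insert_of_not_contains _ _ hcf, List.map_append]
      have h1 : [(p.1, (p.2, false))].map
          (fun q => if q.1 ∈ t.map Prod.fst then (q.1, (max q.2.1 (f q.1), true)) else q)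
          = [(p.1, (p.2, false))] := by simp [hpt]
      rw [h1]
      have h2 : acc.items.map
            (fun q => if q.1 ∈ t.map Prod.fst then (q.1, (max q.2.1 (f q.1), true)) else q)
          = acc.items.map
            (fun q => if q.1 ∈ (p :: t).map Prod.fst then (q.1, (max q.2.1 (f q.1), true)) else q) := by
        apply List.map_congr_left
        intro q hq
        have hqp : q.1 ≠ p.1 := by
          intro h
          have : acc.contains q.1 = true :=
            (PySem.Dict.contains_iff_mem_keys _ _).mpr (PySem.Dict.mem_keys_of_mem_items _ hq)
          rw [h] at this
          exact absurd this (by simp [hcf])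
        by_cases hm : q.1 ∈ List.map Prod.fst t
        · simp [hm, List.mem_cons]
        · simp [hm, List.mem_cons, hqp]
      rw [h2]
      have hfilter : t.filter (fun q => !(acc.insert p.1 (p.2, false)).contains q.1)
          = t.filter (fun q => !acc.contains q.1) := by
        apply List.filter_congr
        intro q hq
        have hqp : q.1 ≠ p.1 := fun h => hpt (h ▸ List.mem_map_of_mem hq)
        simp [PySem.Dict.contains_insert, hqp]
      rw [hfilter]
      have h3 : (p :: t).filter (fun q => !acc.contains q.1)
          = p :: t.filter (fun q => !acc.contains q.1) := by simp [hcf]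
      rw [h3]
      simp

theorem merge_equal (v1 v2 : List (String × Int))
    (h1 : (v1.map Prod.fst).Nodup) (h2 : (v2.map Prod.fst).Nodup) :
    merge_vectors_py v1 v2 = merge_vectors_py_alt v1 v2 := by
  unfold merge_vectors_py merge_vectors_py_alt
  simp only []
  set d1 : PySem.Dict String Int := PySem.Dict.mk v1 with hd1
  set d2 : PySem.Dict String Int := PySem.Dict.mk v2 with hd2
  have hk1 : d1.keys.Nodup := h1
  have hk2 : d2.keys.Nodup := h2
  have hi1 : d1.items = v1 := rfl
  have hi2 : d2.items = v2 := rfl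
  -- ===== A side =====
  set g1 : String → Int := fun key =>
    max (d1.getD key 0) (if d2.contains key then d2.getD key 0 else -(d1.getD key 0)) with hg1
  set g2 : String → Int := fun key =>
    max (if d1.contains key then d1.getD key 0 else -(d2.getD key 0)) (d2.getD key 0) with hg2
  have hA1 : (d1.keys.foldl (fun nv key => nv.insert key (g1 key))
      (PySem.Dict.empty : PySem.Dict String Int)).items = d1.keys.map (fun k => (k, g1 k)) := by
    rw [pv_foldl_insert_items g1 d1.keys PySem.Dict.empty hk1]
    simp [PySem.Dict.empty]
  have hA : (d2.keys.foldl (fun nv key => nv.insert key (g2 key))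
      (d1.keys.foldl (fun nv key => nv.insert key (g1 key))
        (PySem.Dict.empty : PySem.Dict String Int))).items
      = d1.keys.map (fun k => if k ∈ d2.keys then (k, g2 k) else (k, g1 k))
        ++ (d2.keys.filter (fun k => !d1.contains k)).map (fun k => (k, g2 k)) := by
    rw [pv_foldl_insert_items g2 d2.keys _ hk2]
    set nv1 := d1.keys.foldl (fun nv key => nv.insert key (g1 key))
      (PySem.Dict.empty : PySem.Dict String Int) with hnv1
    have hitems : nv1.items = d1.keys.map (fun k => (k, g1 k)) := hA1
    have hkeys : nv1.keys = d1.keys := by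
      show nv1.items.map Prod.fst = d1.keys
      rw [hitems, List.map_map]
      simp [Function.comp_def]
    congr 1
    · rw [hitems, List.map_map]
      apply List.map_congr_left
      intro k _
      by_cases hmem : k ∈ d2.keys <;> simp [Function.comp, hmem]
    · apply congrArg
      apply List.filter_congr
      intro k _
      have : nv1.contains k = d1.contains k := by
        rw [PySem.Dict.contains_eq_decide_mem_keys, PySem.Dict.contains_eq_decide_mem_keys, hkeys]
      rw [this]
  -- ===== B side =====
  have hstep : (fun (acc : PySem.Dict String (Int × Bool)) (p : String × Int) =>
      acc.insert p.1
        (if acc.contains p.1 then (max (acc.getD p.1 (0, false)).1 p.2, true)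
         else (p.2, false))) = pvStep := rfl
  rw [hstep, List.foldl_append]
  show (List.foldl (fun nv key => nv.insert key (g2 key))
      (List.foldl (fun nv key => nv.insert key (g1 key)) PySem.Dict.empty d1.keys) d2.keys).items
    = (List.foldl (fun d p => d.insert p.1 (if p.2.2 = true then p.2.1 else |p.2.1|)) PySem.Dict.empty
        (List.foldl pvStep (List.foldl pvStep PySem.Dict.empty v1) v2).items).items
  set f : String → Int := fun k => d2.getD k 0 with hfd
  -- phase 1: v1's items are all fresh in the empty accumulator
  set acc1 := v1.foldl pvStep (PySem.Dict.empty : PySem.Dict String (Int × Bool)) with hacc1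
  have hB1 : acc1.items = v1.map (fun p => (p.1, (p.2, false))) := by
    rw [hacc1, pv_fold_fresh v1 PySem.Dict.empty h1 (by intro p _; simp [PySem.Dict.empty])]
    simp [PySem.Dict.empty]
  have hkeys1 : acc1.keys = v1.map Prod.fst := by
    show acc1.items.map Prod.fst = v1.map Prod.fst
    rw [hB1, List.map_map]
    rfl
  have hnd1 : acc1.keys.Nodup := by rw [hkeys1]; exact h1
  have hcont1 : ∀ k, acc1.contains k = d1.contains k := by
    intro k
    rw [PySem.Dict.contains_eq_decide_mem_keys, PySem.Dict.contains_eq_decide_mem_keys, hkeys1]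
    rfl
  have hfval : ∀ p ∈ v2, f p.1 = p.2 := by
    intro p hp
    obtain ⟨a, b⟩ := p
    exact PySem.Dict.getD_of_mem_items _ (hi2 ▸ hp) hk2 0
  -- phase 2: v2's items update shared keys in place and append the fresh ones
  set acc := v2.foldl pvStep acc1 with hacc
  have hB2 : acc.items
      = v1.map (fun p => if p.1 ∈ v2.map Prod.fst
            then (p.1, (max p.2 (f p.1), true)) else (p.1, (p.2, false)))
        ++ (v2.filter (fun p => !d1.contains p.1)).map (fun p => (p.1, (p.2, false))) := by
    rw [hacc, pv_fold_update v2 acc1 h2 hnd1 f hfval, hB1, List.map_map]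
    refine congrArg₂ (· ++ ·) ?_ ?_
    · apply List.map_congr_left
      intro p _
      by_cases hm : p.1 ∈ v2.map Prod.fst <;> simp [Function.comp, hm]
    · have hfe : v2.filter (fun p => !acc1.contains p.1)
          = v2.filter (fun p => !d1.contains p.1) :=
        List.filter_congr (fun p _ => by rw [hcont1])
      rw [hfe]
  have hknd : acc.keys.Nodup := by
    show (acc.items.map Prod.fst).Nodup
    rw [hB2, List.map_append, List.map_map, List.map_map]
    have e1 : v1.map (Prod.fst ∘ fun p => if p.1 ∈ v2.map Prod.fst
            then (p.1, (max p.2 (f p.1), true)) else (p.1, (p.2, false)))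
        = v1.map Prod.fst := by
      apply List.map_congr_left
      intro p _
      by_cases hm : p.1 ∈ v2.map Prod.fst <;> simp [Function.comp, hm]
    have e2 : (v2.filter (fun p => !d1.contains p.1)).map
          (Prod.fst ∘ fun p => (p.1, (p.2, false)))
        = (v2.filter (fun p => !d1.contains p.1)).map Prod.fst := rfl
    rw [e1, e2]
    refine List.Nodup.append h1 ?_ ?_
    · exact h2.sublist (List.Sublist.map Prod.fst List.filter_sublist)
    · intro a ha hb
      obtain ⟨p, hp, hpa⟩ := List.mem_map.mp hb
      have := List.of_mem_filter hp
      rw [hpa] at this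
      have hc : d1.contains a = true := by
        rw [PySem.Dict.contains_eq_decide_mem_keys]
        simp only [decide_eq_true_eq]
        exact ha
      simp [hc] at this
  -- finalize pass appends all (fresh, distinct) keys of acc in order
  have hB3 : (acc.items.foldl (fun d p =>
        d.insert p.1 (if p.2.2 then p.2.1 else |p.2.1|))
        (PySem.Dict.empty : PySem.Dict String Int) |>.items)
      = acc.items.map (fun p => (p.1, if p.2.2 then p.2.1 else |p.2.1|)) := by
    have h := PySem.Dict.items_foldl_insert_fresh acc.items Prod.fst
      (fun p => if p.2.2 then p.2.1 else |p.2.1|)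
      (PySem.Dict.empty : PySem.Dict String Int)
      (fun a _ => by simp [PySem.Dict.empty]) hknd
    simpa [PySem.Dict.empty] using h
  rw [hA, hB3, hB2, List.map_append, List.map_map, List.map_map]
  -- compare the two halves pointwise
  have hget1 : ∀ p ∈ v1, d1.getD p.1 0 = p.2 := by
    intro p hp
    obtain ⟨a, b⟩ := p
    exact PySem.Dict.getD_of_mem_items _ (hi1 ▸ hp) hk1 0
  congr 1
  · have hAk : d1.keys.map (fun k => if k ∈ d2.keys then (k, g2 k) else (k, g1 k))
        = v1.map ((fun k => if k ∈ d2.keys then (k, g2 k) else (k, g1 k)) ∘ Prod.fst) := by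
      show (d1.items.map Prod.fst).map _ = _
      rw [hi1, List.map_map]
    rw [hAk]
    apply List.map_congr_left
    intro p hp
    have hd1c : d1.contains p.1 = true := by
      rw [PySem.Dict.contains_eq_decide_mem_keys]
      have : p.1 ∈ d1.keys := by
        show p.1 ∈ d1.items.map Prod.fst
        rw [hi1]; exact List.mem_map_of_mem hp
      simp [this]
    have hk2v : d2.keys = v2.map Prod.fst := by
      show d2.items.map Prod.fst = v2.map Prod.fst
      rw [hi2]
    by_cases hm : p.1 ∈ v2.map Prod.fst
    · have hd2c : d2.contains p.1 = true := by
        rw [PySem.Dict.contains_eq_decide_mem_keys, hk2v]; simp [hm]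
      have hmk : p.1 ∈ d2.keys := by rw [hk2v]; exact hm
      simp only [Function.comp, hmk, if_pos, hm]
      simp [hg2, hd1c, hget1 p hp, hfd]
    · have hd2c : d2.contains p.1 = false := by
        rw [PySem.Dict.contains_eq_decide_mem_keys, hk2v]; simp [hm]
      have hmk : p.1 ∉ d2.keys := by rw [hk2v]; exact hm
      simp only [Function.comp, hmk, if_neg, not_false_iff, hm, if_neg]
      simp [hg1, hd2c, hget1 p hp, abs_eq_max_neg.symm]
  · have hAk2 : d2.keys.filter (fun k => !d1.contains k)
        = (v2.filter (fun p => !d1.contains p.1)).map Prod.fst := by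
      show (d2.items.map Prod.fst).filter _ = _
      rw [hi2, List.filter_map]
      rfl
    rw [hAk2, List.map_map]
    apply List.map_congr_left
    intro p hp
    have hpm : p ∈ v2 := List.mem_of_mem_filter hp
    have hd1c : d1.contains p.1 = false := by
      have := List.of_mem_filter hp
      simpa using this
    have hd2c : d2.contains p.1 = true := by
      rw [PySem.Dict.contains_eq_decide_mem_keys]
      have : p.1 ∈ d2.keys := by
        show p.1 ∈ d2.items.map Prod.fst
        rw [hi2]; exact List.mem_map_of_mem hpm
      simp [this]
    simp only [Function.comp]
    simp [hg2, hd1c]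
    rw [max_comm, ← abs_eq_max_neg]
    exact congrArg abs (hfval p hpm)

-- ===== VERDICT (by name: the statement is the Claim_ definition above) =====
theorem merge_vectors_py_spec : Claim_equal_merge_vectors_py := by
  intro v1 v2 _ hpre
  unfold Spec_merge_vectors_py
  exact merge_equal v1 v2 hpre.1 hpre.2
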